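-- pv_equiv track=rewrite | github.com/svend4/pro2 | yijing_transformer/models/geometry.py | find_fixed_points
-- ===== SOURCE A (Python) =====
-- def find_fixed_points(P: int) -> list:
--     """Неподвижные точки упаковки: числа n, для которых position(n) = n-1.
--
--     Следствие 1 Германа: при любом P такие точки существуют.
--     Неподвижные точки — якорные элементы кодбука.
--     """
--     fixed = []
--     pos = 0
--     for n in range(1, P + 1):
--         p = pos % P
--         if p == n - 1:  # число n стоит на «своей» позиции
--             fixed.append(n)
--         pos += n
--     return fixed
-- ===== SOURCE B (Python) =====
-- def find_fixed_points(P: int) -> list: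
--     """Stateless re-implementation: n is a fixed point iff 2*P divides (n-1)*(n-2)."""
--     return [n for n in range(1, P + 1) if (n - 1) * (n - 2) % (2 * P) == 0]
-- ===== Notes on version B (the rewrite author's own statement) =====
-- stated objective: simpler
-- what changed: Drops the running accumulator entirely: a single stateless comprehension keeps n iff the closed-form divisibility (n-1)*(n-2) % (2*P) == 0 holds, which is algebraically equivalent to comparing the running triangular sum mod P with n-1.
import Mathlib
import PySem

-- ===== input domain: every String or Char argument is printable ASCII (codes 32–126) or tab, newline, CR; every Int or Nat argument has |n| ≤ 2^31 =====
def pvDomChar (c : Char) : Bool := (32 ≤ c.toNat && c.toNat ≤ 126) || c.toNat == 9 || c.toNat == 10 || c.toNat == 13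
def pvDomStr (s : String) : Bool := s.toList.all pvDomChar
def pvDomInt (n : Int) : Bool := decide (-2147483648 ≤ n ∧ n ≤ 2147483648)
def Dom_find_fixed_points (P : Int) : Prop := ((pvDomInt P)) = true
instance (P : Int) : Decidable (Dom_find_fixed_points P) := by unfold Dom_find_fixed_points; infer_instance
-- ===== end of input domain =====

-- B replaces A's running-accumulator loop with a stateless filter using an equivalent divisibility test (objective: simpler).

-- ===== PORT A =====
-- literal transliteration: fold over range(1, P+1) carrying the state (fixed, pos)
def find_fixed_points (P : Int) : List Int :=
  ((PySem.List.pyRange 1 (P + 1) 1).foldl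
    (fun (st : List Int × Int) n =>
      let p := PySem.Int.mod st.2 P
      let fixed := if p == n - 1 then st.1 ++ [n] else st.1
      (fixed, st.2 + n))
    ([], 0)).1

-- ===== PORT B =====
def find_fixed_points_alt (P : Int) : List Int :=
  (PySem.List.pyRange 1 (P + 1) 1).filter
    (fun n => PySem.Int.mod ((n - 1) * (n - 2)) (2 * P) == 0)

-- ===== PRECONDITION & SPEC =====
def Spec_find_fixed_points (P : Int) (out : List Int) : Prop := out = find_fixed_points_alt P
instance (P : Int) (out : List Int) : Decidable (Spec_find_fixed_points P out) := by unfold Spec_find_fixed_points; infer_instance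

-- ===== CLAIM (what is proved, stated in full; the proofs are below) =====
def Claim_equal_find_fixed_points : Prop := ∀ (P : Int), Dom_find_fixed_points P → Spec_find_fixed_points P (find_fixed_points P)

-- ===== LEMMAS AND PROOFS =====

-- triangular number 0+1+…+k = the value of A's accumulator `pos` before processing n = k+1
def pvTri (k : Nat) : Int := ((k * (k + 1)) / 2 : Nat)

theorem pvTri_double (k : Nat) : 2 * pvTri k = (k : Int) * (k + 1) := by
  unfold pvTri
  obtain ⟨a, ha⟩ := Nat.even_mul_succ_self k
  rw [ha]
  have h : (a + a) / 2 = a := by omega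
  rw [h]
  have hc : ((k : Int)) * ((k : Int) + 1) = (a : Int) + (a : Int) := by exact_mod_cast congrArg (Nat.cast (R := Int)) ha
  linarith [hc]

theorem pvTri_succ (k : Nat) : pvTri (k + 1) = pvTri k + ((k : Int) + 1) := by
  have h1 := pvTri_double k
  have h2 := pvTri_double (k + 1)
  push_cast at h2
  nlinarith [h1, h2]

-- A's test at step n = k+1 (with pos = pvTri k) coincides with B's divisibility test
theorem pv_cond_eq (P : Int) (hP : 0 < P) (k : Nat) (hk : (k : Int) < P) :
    (PySem.Int.mod (pvTri k) P == ((k : Int) + 1) - 1)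
      = (PySem.Int.mod ((((k : Int) + 1) - 1) * (((k : Int) + 1) - 2)) (2 * P) == 0) := by
  have h2P : (0 : Int) < 2 * P := by omega
  rw [PySem.Int.mod_eq_emod_of_pos hP, PySem.Int.mod_eq_emod_of_pos h2P,
    Bool.eq_iff_iff]
  simp only [beq_iff_eq, add_sub_cancel_right]
  have hkey : 2 * (pvTri k - (k : Int)) = (k : Int) * (((k : Int) + 1) - 2) := by
    linear_combination pvTri_double k
  have hk0 : (0 : Int) ≤ (k : Int) := Int.natCast_nonneg k
  calc pvTri k % P = (k : Int)
      ↔ pvTri k % P = (k : Int) % P := by rw [Int.emod_eq_of_lt hk0 hk]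
    _ ↔ (pvTri k - (k : Int)) % P = 0 := Int.emod_eq_emod_iff_emod_sub_eq_zero
    _ ↔ P ∣ pvTri k - (k : Int) := EuclideanDomain.mod_eq_zero
    _ ↔ 2 * P ∣ 2 * (pvTri k - (k : Int)) := (mul_dvd_mul_iff_left (two_ne_zero)).symm
    _ ↔ 2 * P ∣ (k : Int) * (((k : Int) + 1) - 2) := by rw [hkey]
    _ ↔ ((k : Int) * (((k : Int) + 1) - 2)) % (2 * P) = 0 := EuclideanDomain.mod_eq_zero.symm

-- loop invariant: after the first k iterations the state is (B's filter of 1..k, pvTri k)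
theorem pv_loop (P : Int) (hP : 0 < P) (k : Nat) (hk : (k : Int) ≤ P) :
    (PySem.List.pyRange 1 ((k : Int) + 1) 1).foldl
      (fun (st : List Int × Int) n =>
        let p := PySem.Int.mod st.2 P
        let fixed := if p == n - 1 then st.1 ++ [n] else st.1
        (fixed, st.2 + n))
      ([], 0)
    = ((PySem.List.pyRange 1 ((k : Int) + 1) 1).filter
        (fun n => PySem.Int.mod ((n - 1) * (n - 2)) (2 * P) == 0), pvTri k) := by
  induction k with
  | zero =>
      rw [PySem.List.pyRange_one_eq_nil (by norm_num)]
      simp [pvTri]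
  | succ m ih =>
      have hm : (m : Int) ≤ P := by push_cast at hk ⊢; omega
      have hmlt : (m : Int) < P := by push_cast at hk ⊢; omega
      have hsplit : PySem.List.pyRange 1 ((m : Int) + 1 + 1) 1
          = PySem.List.pyRange 1 ((m : Int) + 1) 1 ++ [(m : Int) + 1] :=
        PySem.List.pyRange_one_succ_right (by omega)
      push_cast
      rw [hsplit, List.foldl_append, ih hm, List.filter_append]
      simp only [List.foldl_cons, List.foldl_nil, List.filter_cons, List.filter_nil]
      rw [← pv_cond_eq P hP m hmlt]
      split_ifs <;> simp [pvTri_succ]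

-- ===== VERDICT (by name: the statement is the Claim_ definition above) =====
theorem find_fixed_points_spec : Claim_equal_find_fixed_points := by
  intro P _
  unfold Spec_find_fixed_points find_fixed_points find_fixed_points_alt
  by_cases hP : 0 < P
  · have hk : ((P.toNat : Int)) = P := Int.toNat_of_nonneg (le_of_lt hP)
    have := pv_loop P hP P.toNat (by omega)
    rw [hk] at this
    rw [this]
  · rw [PySem.List.pyRange_one_eq_nil (by omega)]
    simp
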